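-- pv_equiv track=rewrite | github.com/Yishak27/SparkLite | services/natural_language_service.py | _is_chat_history_request
-- ===== SOURCE A (Python) =====
-- def _is_chat_history_request(user_query):
--     """Detect if user is asking to see chat history"""
--     history_keywords = [
--         "show history", "chat history", "conversation history", "show chat", "view history",
--         "what did we talk about", "previous conversation", "show memory", "what do you remember",
--         "our conversation", "chat log", "message history", "show messages", "previous messages"
--     ]
--
--     query_lower = user_query.lower()
--     return any(keyword in query_lower for keyword in history_keywords)
-- ===== SOURCE B (Python) =====
-- def _is_chat_history_request(user_query):
--     """Detect if user is asking to see chat history"""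
--     history_keywords = [
--         "show history", "chat history", "conversation history", "show chat", "view history",
--         "what did we talk about", "previous conversation", "show memory", "what do you remember",
--         "our conversation", "chat log", "message history", "show messages", "previous messages"
--     ]
--
--     query_lower = user_query.lower()
--     # single left-to-right pass over the query: at each position, test whether
--     # some keyword starts there (position-major scan instead of one full
--     # substring search per keyword)
--     for i in range(len(query_lower) + 1):
--         for keyword in history_keywords:
--             if query_lower.startswith(keyword, i):
--                 return True
--     return False
-- ===== Notes on version B (the rewrite author's own statement) =====
-- stated objective: alternative
-- what changed: Replaces A's keyword-major any() over N independent full-string substring scans by a single position-major left-to-right scan of the lowered query that tests all keywords as prefixes at each position (the hand-rolled form of one alternation-automaton pass).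
import Mathlib
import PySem

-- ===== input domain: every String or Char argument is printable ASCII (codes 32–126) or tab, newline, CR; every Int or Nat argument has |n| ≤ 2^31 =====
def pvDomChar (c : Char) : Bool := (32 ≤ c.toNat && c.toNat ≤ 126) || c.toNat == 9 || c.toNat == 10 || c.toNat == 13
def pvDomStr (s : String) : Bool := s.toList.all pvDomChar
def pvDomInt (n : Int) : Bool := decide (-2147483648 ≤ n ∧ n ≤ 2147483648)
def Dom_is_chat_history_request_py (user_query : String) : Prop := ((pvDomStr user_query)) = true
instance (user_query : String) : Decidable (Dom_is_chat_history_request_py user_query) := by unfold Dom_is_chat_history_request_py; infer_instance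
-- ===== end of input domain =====

-- B replaces A's per-keyword substring scans by one position-major pass over the lowered query (alternative decomposition, same cost class).
-- ===== PORT A =====
def pvHistoryKeywords : List String :=
  ["show history", "chat history", "conversation history", "show chat", "view history",
   "what did we talk about", "previous conversation", "show memory", "what do you remember",
   "our conversation", "chat log", "message history", "show messages", "previous messages"]

def is_chat_history_request_py (user_query : String) : Bool :=
  let query_lower := PySem.Str.lower user_query
  pvHistoryKeywords.any (fun keyword => PySem.Str.isIn keyword query_lower)

-- ===== PORT B =====
-- q.startswith(k, i) for 0 <= i <= len(q) is ported exactly as: k.toList is tested as a prefix of (drop i).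
def is_chat_history_request_py_alt (user_query : String) : Bool :=
  let q := (PySem.Str.lower user_query).toList
  (List.range (q.length + 1)).any (fun i =>
    pvHistoryKeywords.any (fun keyword => PySem.Chars.startswith (q.drop i) keyword.toList))

-- ===== PRECONDITION & SPEC =====
def Spec_is_chat_history_request_py (user_query : String) (out : Bool) : Prop := out = is_chat_history_request_py_alt user_query
instance (user_query : String) (out : Bool) : Decidable (Spec_is_chat_history_request_py user_query out) := by unfold Spec_is_chat_history_request_py; infer_instance

-- ===== CLAIM (what is proved, stated in full; the proofs are below) =====
def Claim_equal_is_chat_history_request_py : Prop := ∀ (user_query : String), Dom_is_chat_history_request_py user_query → Spec_is_chat_history_request_py user_query (is_chat_history_request_py user_query)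

-- ===== LEMMAS AND PROOFS =====

-- ===== VERDICT (by name: the statement is the Claim_ definition above) =====
theorem is_chat_history_request_py_spec : Claim_equal_is_chat_history_request_py := by
  intro user_query _
  unfold Spec_is_chat_history_request_py
  simp only [is_chat_history_request_py, is_chat_history_request_py_alt]
  rw [Bool.eq_iff_iff]
  simp only [List.any_eq_true, List.mem_range, PySem.Chars.startswith_iff,
    PySem.Str.isIn_iff_infix, PySem.Str.toList_lower]
  constructor
  · rintro ⟨k, hk, hinf⟩
    rcases (PySem.Chars.exists_prefix_drop_iff_isIn (sub := k.toList)
      (s := (PySem.Chars.lower user_query.toList))).mpr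
      ((PySem.Chars.isIn_iff_infix _ _).mpr hinf) with ⟨j, hj⟩
    refine ⟨min j (PySem.Chars.lower user_query.toList).length, by omega, k, hk, ?_⟩
    rcases Nat.lt_or_ge (PySem.Chars.lower user_query.toList).length j with h | h
    · have hnil : (PySem.Chars.lower user_query.toList).drop j = [] :=
        List.drop_eq_nil_of_le (by omega)
      simp only [Nat.min_eq_right (Nat.le_of_lt h)]
      simpa [hnil] using hj
    · simpa [Nat.min_eq_left h] using hj
  · rintro ⟨i, _, k, hk, hpre⟩
    refine ⟨k, hk, ?_⟩
    exact (PySem.Chars.isIn_iff_infix _ _).mp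
      ((PySem.Chars.exists_prefix_drop_iff_isIn _ _).mp ⟨i, hpre⟩)
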